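-- pv_equiv track=rewrite | github.com/FennexFox/packetflow_foundry | builders/packet-workflow/retained-skills/gh-create-pr/scripts/validate_pr_create.py | normalize_handles
-- ===== SOURCE A (Python) =====
-- from typing import Any
--
-- def normalize_handles(values: list[Any]) -> list[str]:
--     tokens: dict[str, str] = {}
--     for value in values:
--         for piece in str(value or "").split(","):
--             token = piece.strip().lower()
--             if token and token not in tokens:
--                 tokens[token] = token
--     return sorted(tokens.values())
-- ===== SOURCE B (Python) =====
-- def normalize_handles(values):
--     tokens = []
--     for value in values:
--         for piece in str(value or "").split(","):
--             token = piece.strip().lower()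
--             if token:
--                 tokens.append(token)
--     result = []
--     prev = None
--     for token in sorted(tokens):
--         if token != prev:
--             result.append(token)
--             prev = token
--     return result
-- ===== Notes on version B (the rewrite author's own statement) =====
-- stated objective: alternative
-- what changed: B collects every non-empty normalized token into a flat list (duplicates kept), sorts it, and deduplicates in one adjacent-compare pass over the sorted list, instead of A's hash-dict membership dedup before sorting.
import Mathlib
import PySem

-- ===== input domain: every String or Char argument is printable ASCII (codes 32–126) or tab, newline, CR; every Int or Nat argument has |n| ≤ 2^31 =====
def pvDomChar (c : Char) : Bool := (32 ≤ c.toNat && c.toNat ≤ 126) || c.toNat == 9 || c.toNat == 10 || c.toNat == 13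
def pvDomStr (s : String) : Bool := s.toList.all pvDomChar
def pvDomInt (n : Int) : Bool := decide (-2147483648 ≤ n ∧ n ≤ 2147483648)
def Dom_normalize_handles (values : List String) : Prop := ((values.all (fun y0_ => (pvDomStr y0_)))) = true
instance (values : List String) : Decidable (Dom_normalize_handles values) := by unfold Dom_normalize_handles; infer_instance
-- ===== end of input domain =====

-- B replaces A's dict-based membership dedup with a flat token list that is sorted and
-- deduplicated by one adjacent-compare pass (alternative decomposition, same cost).


-- ===== PORT A =====
-- A: dict keyed by token (insert only when absent), then sorted(dict.values()).
-- On a string argument `str(value or "")` is the string itself ("" stays ""), so it is ported as `value`.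
def normalize_handles (values : List String) : List String :=
  let tokens : PySem.Dict String String :=
    values.foldl (fun toks value =>
      ((PySem.Str.split? value ",").getD []).foldl (fun toks piece =>
        let token := PySem.Str.lower (PySem.Str.strip piece)
        if token ≠ "" ∧ toks.contains token = false then toks.insert token token else toks) toks)
      PySem.Dict.empty
  PySem.List.sorted tokens.values (fun x => x) false

-- ===== PORT B =====
-- B: flat list of all non-empty tokens, sorted, then one adjacent-compare dedup pass.
def normalize_handles_alt (values : List String) : List String :=
  let tokens : List String :=
    values.foldl (fun acc value =>
      ((PySem.Str.split? value ",").getD []).foldl (fun acc piece =>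
        let token := PySem.Str.lower (PySem.Str.strip piece)
        if token ≠ "" then acc ++ [token] else acc) acc) []
  ((PySem.List.sorted tokens (fun x => x) false).foldl
    (fun st token => if some token ≠ st.2 then (st.1 ++ [token], some token) else st)
    (([] : List String), (none : Option String))).1

-- ===== PRECONDITION & SPEC =====
def Spec_normalize_handles (values : List String) (out : List String) : Prop := out = normalize_handles_alt values
instance (values : List String) (out : List String) : Decidable (Spec_normalize_handles values out) := by unfold Spec_normalize_handles; infer_instance

-- ===== CLAIM (what is proved, stated in full; the proofs are below) =====
def Claim_equal_normalize_handles : Prop := ∀ (values : List String), Dom_normalize_handles values → Spec_normalize_handles values (normalize_handles values)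

-- ===== LEMMAS AND PROOFS =====

-- shadow of A's dict: the dict always holds (t, t) pairs in first-insertion order,
-- so it is `Dict.mk (pvDiag s)` for the list s of distinct tokens seen so far.
def pvDiag (s : List String) : List (String × String) := s.map (fun t => (t, t))

-- A's inner loop body, mirrored on the shadow list
def pvSAdd (s : List String) (piece : String) : List String :=
  let token := PySem.Str.lower (PySem.Str.strip piece)
  if token ≠ "" ∧ token ∉ s then s ++ [token] else s

lemma pv_contains_diag (s : List String) (t : String) :
    (PySem.Dict.mk (pvDiag s)).contains t = decide (t ∈ s) := by
  induction s with
  | nil => simp [pvDiag, PySem.Dict.contains_mk]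
  | cons a s ih =>
    simp only [pvDiag, PySem.Dict.contains_mk, List.map_cons, List.any_cons] at *
    by_cases h : a = t <;> simp [h, ih, show t = a ↔ a = t from eq_comm]

lemma pv_insert_diag (s : List String) (t : String) (h : t ∉ s) :
    (PySem.Dict.mk (pvDiag s)).insert t t = PySem.Dict.mk (pvDiag (s ++ [t])) := by
  simp [pvDiag, PySem.Dict.insert, h]

lemma pv_values_diag (s : List String) : (PySem.Dict.mk (pvDiag s)).values = s := by
  induction s with
  | nil => simp [pvDiag, PySem.Dict.values]
  | cons a s ih => simp only [pvDiag, PySem.Dict.values, List.map_cons] at *; simp [ih]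

-- A's inner fold over pieces equals the shadow fold
lemma pv_inner_shadow (ps : List String) (s : List String) :
    ps.foldl (fun toks piece =>
        let token := PySem.Str.lower (PySem.Str.strip piece)
        if token ≠ "" ∧ toks.contains token = false then toks.insert token token else toks)
      (PySem.Dict.mk (pvDiag s))
    = PySem.Dict.mk (pvDiag (ps.foldl pvSAdd s)) := by
  induction ps generalizing s with
  | nil => rfl
  | cons p ps ih =>
    simp only [List.foldl_cons]
    have hstep : (if PySem.Str.lower (PySem.Str.strip p) ≠ "" ∧
          (PySem.Dict.mk (pvDiag s)).contains (PySem.Str.lower (PySem.Str.strip p)) = false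
        then (PySem.Dict.mk (pvDiag s)).insert (PySem.Str.lower (PySem.Str.strip p)) (PySem.Str.lower (PySem.Str.strip p))
        else PySem.Dict.mk (pvDiag s)) = PySem.Dict.mk (pvDiag (pvSAdd s p)) := by
      rw [pv_contains_diag]
      by_cases h1 : PySem.Str.lower (PySem.Str.strip p) = ""
      · simp [pvSAdd, h1]
      · by_cases h2 : PySem.Str.lower (PySem.Str.strip p) ∈ s
        · simp [pvSAdd, h1, h2]
        · simp [pvSAdd, h1, h2, pv_insert_diag _ _ h2]
    rw [hstep]
    exact ih (pvSAdd s p)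

-- A's outer fold equals the shadow fold
lemma pv_outer_shadow (vs : List String) (s : List String) :
    vs.foldl (fun toks value =>
        ((PySem.Str.split? value ",").getD []).foldl (fun toks piece =>
          let token := PySem.Str.lower (PySem.Str.strip piece)
          if token ≠ "" ∧ toks.contains token = false then toks.insert token token else toks) toks)
      (PySem.Dict.mk (pvDiag s))
    = PySem.Dict.mk (pvDiag (vs.foldl (fun s value => ((PySem.Str.split? value ",").getD []).foldl pvSAdd s) s)) := by
  induction vs generalizing s with
  | nil => rfl
  | cons v vs ih => simp only [List.foldl_cons, pv_inner_shadow, ih]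

-- membership and nodup of the shadow fold
lemma pv_sAdd_mem (ps : List String) (s : List String) (x : String) :
    x ∈ ps.foldl pvSAdd s ↔ x ∈ s ∨ (x ≠ "" ∧ ∃ p ∈ ps, PySem.Str.lower (PySem.Str.strip p) = x) := by
  induction ps generalizing s with
  | nil => simp
  | cons p ps ih =>
    simp only [List.foldl_cons]
    by_cases h1 : PySem.Str.lower (PySem.Str.strip p) = ""
    · rw [show pvSAdd s p = s from by simp [pvSAdd, h1], ih]
      simp only [List.mem_cons]
      constructor
      · rintro (hs | ⟨hne, q, hq, hq2⟩)
        exacts [Or.inl hs, Or.inr ⟨hne, q, Or.inr hq, hq2⟩]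
      · rintro (hs | ⟨hne, q, (rfl | hq), hq2⟩)
        exacts [Or.inl hs, absurd (hq2.symm.trans h1) hne, Or.inr ⟨hne, q, hq, hq2⟩]
    · by_cases h2 : PySem.Str.lower (PySem.Str.strip p) ∈ s
      · rw [show pvSAdd s p = s from by simp [pvSAdd, h2], ih]
        simp only [List.mem_cons]
        constructor
        · rintro (hs | ⟨hne, q, hq, hq2⟩)
          exacts [Or.inl hs, Or.inr ⟨hne, q, Or.inr hq, hq2⟩]
        · rintro (hs | ⟨hne, q, (rfl | hq), hq2⟩)
          exacts [Or.inl hs, Or.inl (hq2 ▸ h2), Or.inr ⟨hne, q, hq, hq2⟩]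
      · rw [show pvSAdd s p = s ++ [PySem.Str.lower (PySem.Str.strip p)] from by
          simp [pvSAdd, h1, h2], ih]
        simp only [List.mem_append, List.mem_cons, List.mem_nil_iff, or_false]
        constructor
        · rintro ((hs | hx) | ⟨hne, q, hq, hq2⟩)
          exacts [Or.inl hs, Or.inr ⟨by rw [hx]; exact h1, p, Or.inl rfl, hx.symm⟩,
            Or.inr ⟨hne, q, Or.inr hq, hq2⟩]
        · rintro (hs | ⟨hne, q, (rfl | hq), hq2⟩)
          exacts [Or.inl (Or.inl hs), Or.inl (Or.inr hq2.symm), Or.inr ⟨hne, q, hq, hq2⟩]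

lemma pv_sAdd_nodup (ps : List String) (s : List String) (h : s.Nodup) :
    (ps.foldl pvSAdd s).Nodup := by
  induction ps generalizing s with
  | nil => exact h
  | cons p ps ih =>
    simp only [List.foldl_cons, pvSAdd]
    split
    · next hc => exact ih _ (List.Nodup.append h (List.nodup_singleton _) (by simp [hc.2]))
    · exact ih _ h

-- the shadow of A's whole loop
def pvShadow (values : List String) : List String :=
  values.foldl (fun s value => ((PySem.Str.split? value ",").getD []).foldl pvSAdd s) []

lemma pv_shadow_mem (vs : List String) (x : String) :
    x ∈ pvShadow vs ↔ x ≠ "" ∧ ∃ v ∈ vs, ∃ p ∈ (PySem.Str.split? v ",").getD [], PySem.Str.lower (PySem.Str.strip p) = x := by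
  suffices h : ∀ s, x ∈ vs.foldl (fun s value => ((PySem.Str.split? value ",").getD []).foldl pvSAdd s) s ↔
      x ∈ s ∨ (x ≠ "" ∧ ∃ v ∈ vs, ∃ p ∈ (PySem.Str.split? v ",").getD [], PySem.Str.lower (PySem.Str.strip p) = x) by
    have := h []; simpa [pvShadow] using this
  intro s
  induction vs generalizing s with
  | nil => simp
  | cons v vs ih =>
    simp only [List.foldl_cons, ih, pv_sAdd_mem]
    constructor
    · rintro ((hs | ⟨hne, p, hp, hp2⟩) | ⟨hne, w, hw, hw2⟩)
      · exact Or.inl hs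
      · exact Or.inr ⟨hne, v, List.mem_cons_self, p, hp, hp2⟩
      · exact Or.inr ⟨hne, w, List.mem_cons_of_mem _ hw, hw2⟩
    · rintro (hs | ⟨hne, w, hw, p, hp, hp2⟩)
      · exact Or.inl (Or.inl hs)
      · rcases List.mem_cons.mp hw with h | h
        · exact Or.inl (Or.inr ⟨hne, p, h ▸ hp, hp2⟩)
        · exact Or.inr ⟨hne, w, h, p, hp, hp2⟩

lemma pv_shadow_nodup (vs : List String) : (pvShadow vs).Nodup := by
  suffices h : ∀ s : List String, s.Nodup →
      (vs.foldl (fun s value => ((PySem.Str.split? value ",").getD []).foldl pvSAdd s) s).Nodup by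
    exact h [] List.nodup_nil
  intro s hs
  induction vs generalizing s with
  | nil => exact hs
  | cons v vs ih => exact ih _ (pv_sAdd_nodup _ _ hs)

-- A's result, named
lemma pv_A_eq (vs : List String) :
    normalize_handles vs = PySem.List.sorted (pvShadow vs) (fun x => x) false := by
  unfold normalize_handles
  have h0 : (PySem.Dict.empty : PySem.Dict String String) = PySem.Dict.mk (pvDiag []) := rfl
  simp only [h0, pv_outer_shadow, pv_values_diag, pvShadow]

-- B's flat token list: membership
lemma pv_Btok_mem (vs : List String) (x : String) :
    x ∈ vs.foldl (fun acc value =>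
        ((PySem.Str.split? value ",").getD []).foldl (fun acc piece =>
          let token := PySem.Str.lower (PySem.Str.strip piece)
          if token ≠ "" then acc ++ [token] else acc) acc) ([] : List String)
    ↔ x ≠ "" ∧ ∃ v ∈ vs, ∃ p ∈ (PySem.Str.split? v ",").getD [], PySem.Str.lower (PySem.Str.strip p) = x := by
  suffices h : ∀ (acc : List String) (vs : List String), x ∈ vs.foldl (fun acc value =>
      ((PySem.Str.split? value ",").getD []).foldl (fun acc piece =>
        let token := PySem.Str.lower (PySem.Str.strip piece)
        if token ≠ "" then acc ++ [token] else acc) acc) acc ↔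
      x ∈ acc ∨ (x ≠ "" ∧ ∃ v ∈ vs, ∃ p ∈ (PySem.Str.split? v ",").getD [], PySem.Str.lower (PySem.Str.strip p) = x) by
    have := h [] vs; simpa using this
  have inner : ∀ (ps : List String) (acc : List String), x ∈ ps.foldl (fun acc piece =>
      let token := PySem.Str.lower (PySem.Str.strip piece)
      if token ≠ "" then acc ++ [token] else acc) acc ↔
      x ∈ acc ∨ (x ≠ "" ∧ ∃ p ∈ ps, PySem.Str.lower (PySem.Str.strip p) = x) := by
    intro ps
    induction ps with
    | nil => simp
    | cons p ps ih =>
      intro acc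
      simp only [List.foldl_cons]
      by_cases h1 : PySem.Str.lower (PySem.Str.strip p) = ""
      · rw [if_neg (by simp [h1])]
        rw [ih]
        constructor
        · rintro (hs | ⟨hne, q, hq, hq2⟩)
          · exact Or.inl hs
          · exact Or.inr ⟨hne, q, List.mem_cons_of_mem _ hq, hq2⟩
        · rintro (hs | ⟨hne, q, hq, hq2⟩)
          · exact Or.inl hs
          · rcases List.mem_cons.mp hq with h | h
            · exact absurd (h ▸ hq2) (by simp [h1, Ne.symm hne])
            · exact Or.inr ⟨hne, q, h, hq2⟩
      · rw [if_pos (by simp [h1])]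
        rw [ih]
        simp only [List.mem_append, List.mem_singleton]
        constructor
        · rintro ((hs | hx) | ⟨hne, q, hq, hq2⟩)
          · exact Or.inl hs
          · exact Or.inr ⟨hx ▸ h1, p, List.mem_cons_self, hx.symm⟩
          · exact Or.inr ⟨hne, q, List.mem_cons_of_mem _ hq, hq2⟩
        · rintro (hs | ⟨hne, q, hq, hq2⟩)
          · exact Or.inl (Or.inl hs)
          · rcases List.mem_cons.mp hq with h | h
            · exact Or.inl (Or.inr (h ▸ hq2).symm)
            · exact Or.inr ⟨hne, q, h, hq2⟩
  intro acc vs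
  induction vs generalizing acc with
  | nil => simp
  | cons v vs ih =>
    simp only [List.foldl_cons, ih, inner]
    constructor
    · rintro ((hs | ⟨hne, p, hp, hp2⟩) | ⟨hne, w, hw, hw2⟩)
      · exact Or.inl hs
      · exact Or.inr ⟨hne, v, List.mem_cons_self, p, hp, hp2⟩
      · exact Or.inr ⟨hne, w, List.mem_cons_of_mem _ hw, hw2⟩
    · rintro (hs | ⟨hne, w, hw, p, hp, hp2⟩)
      · exact Or.inl (Or.inl hs)
      · rcases List.mem_cons.mp hw with h | h
        · exact Or.inl (Or.inr ⟨hne, p, h ▸ hp, hp2⟩)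
        · exact Or.inr ⟨hne, w, h, p, hp, hp2⟩

-- B's adjacent-dedup pass: invariant over a sorted tail
lemma pv_adj_inv (l : List String) (cur : List String) (p : String)
    (hl : l.Pairwise (· ≤ ·)) (hp : ∀ x ∈ l, p ≤ x)
    (hcur : cur.Pairwise (· < ·)) (hle : ∀ x ∈ cur, x ≤ p) (hmem : p ∈ cur) :
    (l.foldl (fun st token => if some token ≠ st.2 then (st.1 ++ [token], some token) else st)
      (cur, some p)).1.Pairwise (· < ·) ∧
    (∀ x, x ∈ (l.foldl (fun st token => if some token ≠ st.2 then (st.1 ++ [token], some token) else st)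
      (cur, some p)).1 ↔ x ∈ cur ∨ x ∈ l) := by
  induction l generalizing cur p with
  | nil => exact ⟨hcur, by simp⟩
  | cons t l ih =>
    simp only [List.foldl_cons]
    have hpt : p ≤ t := hp t List.mem_cons_self
    have hlt : ∀ x ∈ l, t ≤ x := fun x hx => (List.pairwise_cons.mp hl).1 x hx
    have hl' : l.Pairwise (· ≤ ·) := (List.pairwise_cons.mp hl).2
    by_cases h : t = p
    · rw [if_neg (by simp [h])]
      obtain ⟨h1, h2⟩ := ih cur p hl' (fun x hx => le_trans (h ▸ hpt) (hlt x hx)) hcur hle hmem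
      refine ⟨h1, fun x => ?_⟩
      rw [h2 x]
      constructor
      · rintro (hx | hx); · exact Or.inl hx
        · exact Or.inr (List.mem_cons_of_mem _ hx)
      · rintro (hx | hx); · exact Or.inl hx
        · rcases List.mem_cons.mp hx with hx | hx
          · exact Or.inl (hx ▸ h ▸ hmem)
          · exact Or.inr hx
    · rw [if_pos (by simp [h])]
      have hplt : p < t := lt_of_le_of_ne hpt (fun e => h e.symm)
      have hcur' : (cur ++ [t]).Pairwise (· < ·) := by
        refine List.pairwise_append.mpr ⟨hcur, List.pairwise_singleton _ _, ?_⟩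
        intro a ha b hb
        rw [List.mem_singleton.mp hb]
        exact lt_of_le_of_lt (hle a ha) hplt
      obtain ⟨h1, h2⟩ := ih (cur ++ [t]) t hl' hlt hcur'
        (fun x hx => by
          rcases List.mem_append.mp hx with hx | hx
          · exact le_of_lt (lt_of_le_of_lt (hle x hx) hplt)
          · rw [List.mem_singleton.mp hx])
        (List.mem_append.mpr (Or.inr (List.mem_singleton_self t)))
      refine ⟨h1, fun x => ?_⟩
      rw [h2 x]
      simp only [List.mem_append, List.mem_cons, List.mem_nil_iff, or_false]
      tauto

-- B's result: strictly increasing, same members as its sorted input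
lemma pv_adj_spec (s : List String) (hs : s.Pairwise (· ≤ ·)) :
    (s.foldl (fun st token => if some token ≠ st.2 then (st.1 ++ [token], some token) else st)
      (([] : List String), (none : Option String))).1.Pairwise (· < ·) ∧
    (∀ x, x ∈ (s.foldl (fun st token => if some token ≠ st.2 then (st.1 ++ [token], some token) else st)
      (([] : List String), (none : Option String))).1 ↔ x ∈ s) := by
  cases s with
  | nil => simp
  | cons t l =>
    simp only [List.foldl_cons, if_pos (by simp : some t ≠ none), List.nil_append]
    obtain ⟨h1, h2⟩ := pv_adj_inv l [t] t (List.pairwise_cons.mp hs).2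
      (fun x hx => (List.pairwise_cons.mp hs).1 x hx)
      (List.pairwise_singleton _ _) (fun x hx => le_of_eq (List.mem_singleton.mp hx))
      (List.mem_singleton_self t)
    refine ⟨h1, fun x => ?_⟩
    rw [h2 x]
    simp

-- ===== VERDICT (by name: the statement is the Claim_ definition above) =====
theorem normalize_handles_spec : Claim_equal_normalize_handles := by
  intro values _
  unfold Spec_normalize_handles
  rw [pv_A_eq]
  unfold normalize_handles_alt
  set Btok := values.foldl (fun acc value =>
      ((PySem.Str.split? value ",").getD []).foldl (fun acc piece =>
        let token := PySem.Str.lower (PySem.Str.strip piece)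
        if token ≠ "" then acc ++ [token] else acc) acc) ([] : List String) with hBtok
  have hsorted : (PySem.List.sorted Btok (fun x => x) false).Pairwise (· ≤ ·) :=
    PySem.List.sorted_pairwise Btok (fun x => x)
  obtain ⟨hlt, hmem⟩ := pv_adj_spec _ hsorted
  refine PySem.List.sorted_eq_of_perm_of_pairwise_lt _ _ _ ?_ hlt
  have hnodupB : (((PySem.List.sorted Btok (fun x => x) false).foldl
      (fun st token => if some token ≠ st.2 then (st.1 ++ [token], some token) else st)
      (([] : List String), (none : Option String))).1).Nodup :=
    hlt.imp (fun h => ne_of_lt h)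
  refine (List.perm_ext_iff_of_nodup hnodupB (pv_shadow_nodup values)).mpr ?_
  intro x
  rw [hmem x, PySem.List.mem_sorted, hBtok, pv_Btok_mem, pv_shadow_mem]
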